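-- pv_equiv track=rewrite | github.com/HebeHH/lift-to-csdf | src/HelperFuncs.py | commasplit
-- ===== SOURCE A (Python) =====
-- def commasplit(s):
--     commas = [-1]
--     open_ctr = 0
--     for i in range(len(s)):
--         if s[i] in ['(', '{', '[']:
--             open_ctr += 1
--         if s[i] in [')', '}', ']']:
--             open_ctr -= 1
--         if s[i] == ',' and open_ctr == 0:
--             commas.append(i)
--     commas.append(len(s))
--     broken = [s[commas[j-1]+1:commas[j]] for j in range(1, len(commas))]
--     return [x.strip() for x in broken if len(x.strip()) > 0]
-- ===== SOURCE B (Python) =====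
-- def commasplit(s):
--     tokens = []
--     buf = ''
--     depth = 0
--     for ch in s:
--         if ch in '({[':
--             depth += 1
--             buf += ch
--         elif ch in ')}]':
--             depth -= 1
--             buf += ch
--         elif ch == ',' and depth == 0:
--             tokens.append(buf)
--             buf = ''
--         else:
--             buf += ch
--     tokens.append(buf)
--     return [t.strip() for t in tokens if t.strip()]
-- ===== Notes on version B (the rewrite author's own statement) =====
-- stated objective: simpler
-- what changed: Instead of recording the indices of top-level commas and then slicing the string between adjacent recorded indices in a second comprehension, B builds each token directly in one pass with a current-buffer string and a depth counter, appending the buffer whenever a depth-0 comma is seen.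
import Mathlib
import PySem

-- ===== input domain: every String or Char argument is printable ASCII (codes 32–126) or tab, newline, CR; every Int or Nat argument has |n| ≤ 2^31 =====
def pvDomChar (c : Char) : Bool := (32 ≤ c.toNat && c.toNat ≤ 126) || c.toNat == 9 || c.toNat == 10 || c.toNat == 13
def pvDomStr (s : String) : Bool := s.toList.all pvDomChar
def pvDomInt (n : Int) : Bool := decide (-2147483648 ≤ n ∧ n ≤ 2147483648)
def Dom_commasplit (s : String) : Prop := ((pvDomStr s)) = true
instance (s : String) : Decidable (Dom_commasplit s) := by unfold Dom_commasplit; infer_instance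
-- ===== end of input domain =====

-- B replaces A's two-stage "record comma indices, then slice between them" with a one-pass
-- buffer-and-depth accumulation of the tokens themselves (objective: simpler).

-- ===== PORT A =====
-- A's loop: for i in range(len(s)): update open_ctr, record top-level comma indices.
def commasplitStep (st : List Int × Int) (i : Int) (c : Char) : List Int × Int :=
  let oc1 := if c = '(' ∨ c = '{' ∨ c = '[' then st.2 + 1 else st.2
  let oc2 := if c = ')' ∨ c = '}' ∨ c = ']' then oc1 - 1 else oc1
  (if c = ',' ∧ oc2 = 0 then st.1 ++ [i] else st.1, oc2)

def commasplit (s : String) : List String :=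
  let cs := s.toList
  let st := (PySem.List.pyRange 0 (cs.length : Int) 1).foldl
      (fun st i => commasplitStep st i (PySem.List.pyGetD cs i ' ')) ([-1], 0)
  let commas := st.1 ++ [(cs.length : Int)]
  let broken := (PySem.List.pyRange 1 (commas.length : Int) 1).map
      (fun j => PySem.List.slice cs (some (PySem.List.pyGetD commas (j - 1) 0 + 1))
                                    (some (PySem.List.pyGetD commas j 0)))
  (broken.filter (fun x => decide (0 < (PySem.Chars.strip x).length))).map
      (fun x => String.ofList (PySem.Chars.strip x))

-- ===== PORT B =====
-- B's loop state: (finished tokens, current buffer, depth).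
def commasplitAltStep (st : List (List Char) × List Char × Int) (ch : Char) :
    List (List Char) × List Char × Int :=
  if ch = '(' ∨ ch = '{' ∨ ch = '[' then (st.1, st.2.1 ++ [ch], st.2.2 + 1)
  else if ch = ')' ∨ ch = '}' ∨ ch = ']' then (st.1, st.2.1 ++ [ch], st.2.2 - 1)
  else if ch = ',' ∧ st.2.2 = 0 then (st.1 ++ [st.2.1], [], st.2.2)
  else (st.1, st.2.1 ++ [ch], st.2.2)

def commasplit_alt (s : String) : List String :=
  let st := s.toList.foldl commasplitAltStep ([], [], 0)
  let tokens := st.1 ++ [st.2.1]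
  (tokens.filter (fun t => decide (PySem.Chars.strip t ≠ []))).map
      (fun t => String.ofList (PySem.Chars.strip t))

-- ===== PRECONDITION & SPEC =====
def Spec_commasplit (s : String) (out : List String) : Prop := out = commasplit_alt s
instance (s : String) (out : List String) : Decidable (Spec_commasplit s out) := by unfold Spec_commasplit; infer_instance

-- ===== CLAIM (what is proved, stated in full; the proofs are below) =====
def Claim_equal_commasplit : Prop := ∀ (s : String), Dom_commasplit s → Spec_commasplit s (commasplit s)

-- ===== LEMMAS AND PROOFS =====

def cutsP (xs : List Char) : List Nat → List Char × List (List Char)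
  | [] => (xs, [])
  | p :: ps =>
    let r := cutsP (xs.drop (p + 1)) (ps.map (· - (p + 1)))
    (xs.take p, r.1 :: r.2)
  termination_by ps => ps.length
  decreasing_by simp

theorem cutsP_shift (ps : List Nat) (c : Char) (cs : List Char) :
    cutsP (c :: cs) (ps.map (· + 1)) = ((c :: (cutsP cs ps).1), (cutsP cs ps).2) := by
  cases ps with
  | nil => simp [cutsP]
  | cons p ps =>
    simp only [List.map_cons, cutsP, List.drop_succ_cons, List.take_succ_cons]
    have h : (ps.map (· + 1)).map (· - (p + 1 + 1)) = ps.map (· - (p + 1)) := by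
      simp only [List.map_map]; apply List.map_congr_left; intro x _; simp only [Function.comp_apply]; omega
    rw [h]
def splitTop : List Char → Int → List Char × List (List Char)
  | [], _ => ([], [])
  | c :: cs, d =>
    if c = '(' ∨ c = '{' ∨ c = '[' then
      let r := splitTop cs (d + 1); (c :: r.1, r.2)
    else if c = ')' ∨ c = '}' ∨ c = ']' then
      let r := splitTop cs (d - 1); (c :: r.1, r.2)
    else if c = ',' ∧ d = 0 then
      let r := splitTop cs d; ([], r.1 :: r.2)
    else
      let r := splitTop cs d; (c :: r.1, r.2)

def psN : List Char → Int → List Nat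
  | [], _ => []
  | c :: cs, d =>
    if c = '(' ∨ c = '{' ∨ c = '[' then (psN cs (d + 1)).map (· + 1)
    else if c = ')' ∨ c = '}' ∨ c = ']' then (psN cs (d - 1)).map (· + 1)
    else if c = ',' ∧ d = 0 then 0 :: (psN cs d).map (· + 1)
    else (psN cs d).map (· + 1)

theorem cutsP_psN (cs : List Char) (d : Int) : cutsP cs (psN cs d) = splitTop cs d := by
  induction cs generalizing d with
  | nil => simp [cutsP, psN, splitTop]
  | cons c cs ih =>
    simp only [psN, splitTop]
    split_ifs with h1 h2 h3
    · rw [cutsP_shift, ih]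
    · rw [cutsP_shift, ih]
    · simp only [cutsP, List.drop_succ_cons, List.drop_zero, List.take_zero]
      have h : ((psN cs d).map (· + 1)).map (· - (0 + 1)) = psN cs d := by
        induction psN cs d with
        | nil => simp
        | cons a l ihl => simp_all
      rw [h, ih]
    · rw [cutsP_shift, ih]

theorem psN_lt (cs : List Char) (d : Int) : ∀ p ∈ psN cs d, p < cs.length := by
  induction cs generalizing d with
  | nil => simp [psN]
  | cons c cs ih =>
    simp only [psN, List.length_cons]
    split_ifs with h1 h2 h3 <;> intro p hp <;>
      first
      | (simp only [List.mem_map] at hp; obtain ⟨q, hq, rfl⟩ := hp;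
         have := ih _ _ hq; omega)
      | (rcases List.mem_cons.1 hp with rfl | hp
         · omega
         · simp only [List.mem_map] at hp; obtain ⟨q, hq, rfl⟩ := hp;
           have := ih _ _ hq; omega)

theorem psN_pairwise (cs : List Char) (d : Int) : (psN cs d).Pairwise (· < ·) := by
  induction cs generalizing d with
  | nil => simp [psN]
  | cons c cs ih =>
    simp only [psN]
    split_ifs with h1 h2 h3 <;>
      first
      | exact (ih _).map _ (by intro a b hab; omega)
      | · refine List.Pairwise.cons ?_ ((ih _).map _ (by intro a b hab; omega))
          intro q hq
          simp only [List.mem_map] at hq; obtain ⟨x, _, rfl⟩ := hq; omega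

theorem foldB (cs : List Char) : ∀ (toks : List (List Char)) (buf : List Char) (d : Int),
    let r := cs.foldl commasplitAltStep (toks, buf, d)
    r.1 ++ [r.2.1] = toks ++ (buf ++ (splitTop cs d).1) :: (splitTop cs d).2 := by
  induction cs with
  | nil => intro toks buf d; simp [splitTop]
  | cons c cs ih =>
    intro toks buf d
    simp only [List.foldl_cons, commasplitAltStep, splitTop]
    split_ifs with h1 h2 h3
    · simpa using (ih toks (buf ++ [c]) (d + 1))
    · simpa using (ih toks (buf ++ [c]) (d - 1))
    · simpa using (ih (toks ++ [buf]) [] d)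
    · simpa using (ih toks (buf ++ [c]) d)

theorem stepA_open (acc : List Int) (d i : Int) (c : Char) (h : c = '(' ∨ c = '{' ∨ c = '[') :
    commasplitStep (acc, d) i c = (acc, d + 1) := by
  rcases h with rfl | rfl | rfl <;> simp [commasplitStep]

theorem stepA_close (acc : List Int) (d i : Int) (c : Char) (h : c = ')' ∨ c = '}' ∨ c = ']') :
    commasplitStep (acc, d) i c = (acc, d - 1) := by
  rcases h with rfl | rfl | rfl <;> simp [commasplitStep]

theorem stepA_comma0 (acc : List Int) (i : Int) :
    commasplitStep (acc, 0) i ',' = (acc ++ [i], 0) := by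
  simp [commasplitStep]

theorem stepA_other (acc : List Int) (d i : Int) (c : Char)
    (h1 : ¬(c = '(' ∨ c = '{' ∨ c = '[')) (h2 : ¬(c = ')' ∨ c = '}' ∨ c = ']'))
    (h3 : ¬(c = ',' ∧ d = 0)) :
    commasplitStep (acc, d) i c = (acc, d) := by
  simp only [commasplitStep, if_neg h1, if_neg h2, if_neg h3]

theorem map_shift (ps : List Nat) (i0 : Int) :
    (List.map (fun x : Nat => x + 1) ps).map (fun p : Nat => i0 + (p : Int))
      = ps.map (fun p : Nat => (i0 + 1) + (p : Int)) := by
  simp only [List.map_map]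
  apply List.map_congr_left
  intro x _
  simp only [Function.comp_apply]
  push_cast
  ring

theorem foldA (cs : List Char) : ∀ (i0 : Int) (d : Int) (acc : List Int),
    ((PySem.List.enumerate cs i0).foldl (fun st p => commasplitStep st p.1 p.2) (acc, d)).1
      = acc ++ (psN cs d).map (fun p : Nat => i0 + (p : Int)) := by
  induction cs with
  | nil => intro i0 d acc; simp [PySem.List.enumerate_nil, psN]
  | cons c cs ih =>
    intro i0 d acc
    rw [PySem.List.enumerate_cons]
    simp only [List.foldl_cons]
    by_cases h1 : c = '(' ∨ c = '{' ∨ c = '['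
    · rw [stepA_open acc d i0 c h1, ih, psN, if_pos h1, map_shift]
    · by_cases h2 : c = ')' ∨ c = '}' ∨ c = ']'
      · rw [stepA_close acc d i0 c h2, ih, psN, if_neg h1, if_pos h2, map_shift]
      · by_cases h3 : c = ',' ∧ d = 0
        · obtain ⟨rfl, rfl⟩ := h3
          rw [stepA_comma0 acc i0, ih, psN, if_neg h1, if_neg h2, if_pos (by simp)]
          simp
          intro a _
          ring
        · rw [stepA_other acc d i0 c h1 h2 h3, ih, psN, if_neg h1, if_neg h2, if_neg h3, map_shift]

def zipAdj (l : List Int) (f : Int → Int → List Char) : List (List Char) :=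
  (l.zip l.tail).map (fun p => f p.1 p.2)

theorem range_zipAdj (l : List Int) (f : Int → Int → List Char) :
    (PySem.List.pyRange 1 (l.length : Int) 1).map
        (fun j => f (PySem.List.pyGetD l (j - 1) 0) (PySem.List.pyGetD l j 0))
      = zipAdj l f := by
  apply List.ext_getElem
  · simp [zipAdj, PySem.List.length_pyRange_one]
  · intro k h1 h2
    have hk : k + 1 < l.length := by
      simp only [List.length_map, PySem.List.length_pyRange_one] at h1
      omega
    simp only [zipAdj, List.getElem_map, PySem.List.getElem_pyRange_one, List.getElem_zip]
    have e1 : PySem.List.pyGetD l (1 + (k : Int) - 1) 0 = l[k] := by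
      rw [show (1 + (k : Int) - 1) = ((k : Nat) : Int) by ring,
          PySem.List.pyGetD_natCast, List.getD_eq_getElem l 0 (by omega)]
    have e2 : PySem.List.pyGetD l (1 + (k : Int)) 0 = l[k + 1] := by
      rw [show (1 + (k : Int)) = (((k + 1 : Nat)) : Int) by push_cast; ring,
          PySem.List.pyGetD_natCast, List.getD_eq_getElem l 0 hk]
    rw [e1, e2, List.getElem_tail]

theorem zipAdj_cons₂ (a b : Int) (t : List Int) (f : Int → Int → List Char) :
    zipAdj (a :: b :: t) f = f a b :: zipAdj (b :: t) f := rfl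

theorem zipAdj_map (l : List Int) (g : Int → Int) (f : Int → Int → List Char) :
    zipAdj (l.map g) f = zipAdj l (fun x y => f (g x) (g y)) := by
  induction l with
  | nil => rfl
  | cons a l ih =>
    cases l with
    | nil => rfl
    | cons b t =>
      simp only [List.map_cons] at ih ⊢
      rw [zipAdj_cons₂, zipAdj_cons₂, ih]

theorem zipAdj_congr (l : List Int) (f g : Int → Int → List Char)
    (h : ∀ x y, x ∈ l → y ∈ l.tail → f x y = g x y) : zipAdj l f = zipAdj l g := by
  unfold zipAdj
  apply List.map_congr_left
  intro p hp
  obtain ⟨h1, h2⟩ := List.of_mem_zip hp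
  exact h _ _ h1 h2

theorem slices_eq_aux (n : Nat) : ∀ (ps : List Nat), ps.length < n → ∀ (cs : List Char),
    (∀ p ∈ ps, p < cs.length) → ps.Pairwise (· < ·) →
    zipAdj ((-1) :: ps.map (fun p : Nat => (p : Int)) ++ [(cs.length : Int)])
        (fun x y => PySem.List.slice cs (some (x + 1)) (some y))
      = (cutsP cs ps).1 :: (cutsP cs ps).2 := by
  induction n with
  | zero => intro ps h; omega
  | succ n ihn =>
    intro ps hn cs hlt hpw
    match ps with
    | [] =>
      simp [zipAdj, cutsP, PySem.List.slice_to_natCast]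
    | p :: ps =>
    have hn' : ps.length < n := by simp at hn; omega
    have hp : p < cs.length := hlt p (by simp)
    have hgt : ∀ x ∈ ps, p < x := fun x hx => (List.pairwise_cons.1 hpw).1 x hx
    have hhead : zipAdj ((-1) :: (p :: ps).map (fun p : Nat => (p : Int)) ++ [(cs.length : Int)])
        (fun x y => PySem.List.slice cs (some (x + 1)) (some y))
      = PySem.List.slice cs (some (-1 + 1)) (some (p : Int))
        :: zipAdj ((p : Int) :: ps.map (fun p : Nat => (p : Int)) ++ [(cs.length : Int)])
            (fun x y => PySem.List.slice cs (some (x + 1)) (some y)) := by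
      simp [zipAdj]
    rw [hhead]
    have hfst : PySem.List.slice cs (some (-1 + 1)) (some (p : Int)) = cs.take p := by
      norm_num [PySem.List.slice_to_natCast]
    set cs' := cs.drop (p + 1) with hcs'
    set qs := ps.map (· - (p + 1)) with hqs
    have hlen' : cs'.length = cs.length - (p + 1) := by simp [hcs']
    have h2 : (qs.map (fun q : Nat => (q : Int))).map (fun x => x + ((p : Int) + 1))
        = ps.map (fun p : Nat => (p : Int)) := by
      rw [hqs]
      simp only [List.map_map]
      apply List.map_congr_left
      intro x hx
      have := hgt x hx
      simp only [Function.comp_apply]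
      omega
    have hmap : ((-1) :: qs.map (fun q : Nat => (q : Int)) ++ [(cs'.length : Int)]).map
          (fun x => x + ((p : Int) + 1))
        = (p : Int) :: ps.map (fun p : Nat => (p : Int)) ++ [(cs.length : Int)] := by
      simp only [List.map_cons, List.map_append, List.map_nil, h2]
      have h1 : (-1 : Int) + ((p : Int) + 1) = (p : Int) := by omega
      have h3 : ((cs'.length : Nat) : Int) + ((p : Int) + 1) = (cs.length : Int) := by omega
      rw [h1, h3]
    have htail : zipAdj ((p : Int) :: ps.map (fun p : Nat => (p : Int)) ++ [(cs.length : Int)])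
        (fun x y => PySem.List.slice cs (some (x + 1)) (some y))
      = zipAdj ((-1) :: qs.map (fun q : Nat => (q : Int)) ++ [(cs'.length : Int)])
          (fun x y => PySem.List.slice cs' (some (x + 1)) (some y)) := by
      rw [← hmap, zipAdj_map]
      apply zipAdj_congr
      intro x y hx hy
      have hx1 : -1 ≤ x := by
        rcases List.mem_cons.1 hx with rfl | hx
        · omega
        rcases List.mem_append.1 hx with hx | hx
        · obtain ⟨q, _, rfl⟩ := List.mem_map.1 hx; omega
        · simp only [List.mem_singleton] at hx; omega
      have hy0 : 0 ≤ y := by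
        rcases List.mem_append.1 hy with hy | hy
        · obtain ⟨q, _, rfl⟩ := List.mem_map.1 hy; omega
        · simp only [List.mem_singleton] at hy; omega
      rw [PySem.List.slice_toNat cs (by omega) (by omega),
          PySem.List.slice_toNat cs' (by omega) (by omega), hcs', List.drop_drop]
      congr 1
      · omega
      congr 1
      omega
    rw [htail, ihn qs (by rw [hqs]; simpa using hn') cs'
        (by
          intro q hq
          obtain ⟨x, hx, rfl⟩ := List.mem_map.1 hq
          have h1 := hgt x hx
          have h2 := hlt x (List.mem_cons_of_mem _ hx)
          omega)
        (by
          refine List.pairwise_map.2 ?_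
          refine ((List.pairwise_cons.1 hpw).2).imp_of_mem ?_
          intro a b ha hb hab
          have := hgt a ha
          omega)]
    rw [hfst]
    simp [cutsP, hcs', hqs]

theorem slices_eq (ps : List Nat) (cs : List Char)
    (hlt : ∀ p ∈ ps, p < cs.length) (hpw : ps.Pairwise (· < ·)) :
    zipAdj ((-1) :: ps.map (fun p : Nat => (p : Int)) ++ [(cs.length : Int)])
        (fun x y => PySem.List.slice cs (some (x + 1)) (some y))
      = (cutsP cs ps).1 :: (cutsP cs ps).2 :=
  slices_eq_aux (ps.length + 1) ps (by omega) cs hlt hpw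

theorem filter_strip_eq (l : List (List Char)) :
    l.filter (fun x => decide (0 < (PySem.Chars.strip x).length))
      = l.filter (fun t => decide (PySem.Chars.strip t ≠ [])) := by
  apply List.filter_congr
  intro x _
  simp [List.length_pos_iff]

-- ===== VERDICT (by name: the statement is the Claim_ definition above) =====
theorem commasplit_spec : Claim_equal_commasplit := by
  intro s _
  show commasplit s = commasplit_alt s
  unfold commasplit commasplit_alt
  have hA := foldA s.toList 0 0 [-1]
  rw [PySem.List.enumerate_eq_map_pyRange s.toList ' ', List.foldl_map] at hA
  simp only [PySem.List.len_eq, zero_add, List.singleton_append] at hA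
  have hB := foldB s.toList [] [] 0
  simp only [List.nil_append] at hB
  simp only []
  rw [hA, hB, range_zipAdj ((-1) :: List.map (fun p : Nat => (p : Int)) (psN s.toList 0)
        ++ [(s.toList.length : Int)])
        (fun x y => PySem.List.slice s.toList (some (x + 1)) (some y)),
      slices_eq (psN s.toList 0) s.toList (psN_lt s.toList 0)
        (psN_pairwise s.toList 0), cutsP_psN, filter_strip_eq]
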